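-- pv_equiv track=rewrite | github.com/P-H-Pancholi/Python_practice_programs | Hackerrank/MarcsCakeWalk.py | marcscakewalk
-- ===== SOURCE A (Python) =====
-- def marcscakewalk(arr):
--     arr.sort(reverse = True)
--     i = 0
--     Sum = 0
--     for e in arr:
--         temp = e *(2**i)
--         Sum += temp
--         i += 1
--     return Sum
-- ===== SOURCE B (Python) =====
-- def marcscakewalk(arr):
--     arr.sort(reverse=True)
--     Sum = 0
--     for e in reversed(arr):
--         Sum = 2 * Sum + e
--     return Sum
-- ===== Notes on version B (the rewrite author's own statement) =====
-- stated objective: simpler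
-- what changed: Replaces the explicit e*2**i exponentiation per element by a Horner-style doubling accumulator (Sum = 2*Sum + e) over the reversed sorted list.
import Mathlib
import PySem

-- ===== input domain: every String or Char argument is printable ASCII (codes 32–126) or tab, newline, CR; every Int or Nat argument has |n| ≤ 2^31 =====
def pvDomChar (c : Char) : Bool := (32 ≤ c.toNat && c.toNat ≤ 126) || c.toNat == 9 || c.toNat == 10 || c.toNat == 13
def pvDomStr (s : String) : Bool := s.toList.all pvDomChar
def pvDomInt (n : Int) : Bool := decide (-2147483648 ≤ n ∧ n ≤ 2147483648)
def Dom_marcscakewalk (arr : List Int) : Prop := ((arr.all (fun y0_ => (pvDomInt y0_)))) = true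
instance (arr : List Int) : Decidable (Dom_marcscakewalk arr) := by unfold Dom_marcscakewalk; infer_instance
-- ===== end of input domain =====

-- B replaces A's per-element 2**i exponentiation by a Horner doubling accumulator over the
-- reversed sorted list (objective: simpler). Both A and B sort the argument in place in Python;
-- the equivalence proved here is about the return value.

-- ===== PORT A =====
-- arr.sort(reverse=True); i = 0; Sum = 0; for e: Sum += e * 2**i; i += 1
def marcscakewalk (arr : List Int) : Int :=
  let s := PySem.List.sorted arr (fun x => x) true
  (s.foldl (fun (p : Nat × Int) e => (p.1 + 1, p.2 + e * 2 ^ p.1)) (0, 0)).2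

-- ===== PORT B =====
-- arr.sort(reverse=True); Sum = 0; for e in reversed(arr): Sum = 2*Sum + e
def marcscakewalk_alt (arr : List Int) : Int :=
  let s := PySem.List.sorted arr (fun x => x) true
  s.reverse.foldl (fun acc e => 2 * acc + e) 0

-- ===== PRECONDITION & SPEC =====
def Spec_marcscakewalk (arr : List Int) (out : Int) : Prop := out = marcscakewalk_alt arr
instance (arr : List Int) (out : Int) : Decidable (Spec_marcscakewalk arr out) := by unfold Spec_marcscakewalk; infer_instance

-- ===== CLAIM (what is proved, stated in full; the proofs are below) =====
def Claim_equal_marcscakewalk : Prop := ∀ (arr : List Int), Dom_marcscakewalk arr → Spec_marcscakewalk arr (marcscakewalk arr)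

-- ===== LEMMAS AND PROOFS =====

-- Horner form as a foldr over the list (B's foldl over the reverse equals this foldr).
theorem pv_horner_foldr (l : List Int) :
    l.reverse.foldl (fun acc e => 2 * acc + e) 0 = l.foldr (fun e acc => 2 * acc + e) 0 := by
  rw [List.foldl_reverse]

-- A's indexed fold, generalized over the starting index and accumulator.
theorem pv_afold (l : List Int) (i : Nat) (S : Int) :
    (l.foldl (fun (p : Nat × Int) e => (p.1 + 1, p.2 + e * 2 ^ p.1)) (i, S)).2
      = S + 2 ^ i * l.foldr (fun e acc => 2 * acc + e) 0 := by
  induction l generalizing i S with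
  | nil => simp
  | cons e t ih =>
    simp only [List.foldl_cons, List.foldr_cons, ih]
    ring

-- ===== VERDICT (by name: the statement is the Claim_ definition above) =====
theorem marcscakewalk_spec : Claim_equal_marcscakewalk := by
  intro arr _
  unfold Spec_marcscakewalk marcscakewalk marcscakewalk_alt
  rw [pv_horner_foldr, pv_afold]
  ring
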